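-- pv_equiv track=rewrite | github.com/incremen/pyfuncs_to_chars | optimize.py | inverse_enum_list
-- ===== SOURCE A (Python) =====
-- MAX_OFFSET = 2
--
-- def inverse_enum_list(target):
--     """Invert target = 8 * parent - offset (only for parent <= 10)."""
--     for offset in range(MAX_OFFSET + 1):
--         val = target + offset
--         if val > 0 and val % 8 == 0:
--             parent = val // 8
--             if 1 <= parent <= 10:
--                 return parent, offset
--     return None
-- ===== SOURCE B (Python) =====
-- MAX_OFFSET = 2
--
-- def inverse_enum_list(target):
--     """Invert target = 8 * parent - offset (only for parent <= 10)."""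
--     offset = (-target) % 8
--     if offset <= MAX_OFFSET:
--         val = target + offset
--         parent = val // 8
--         if val > 0 and 1 <= parent <= 10:
--             return parent, offset
--     return None
-- ===== Notes on version B (the rewrite author's own statement) =====
-- stated objective: simpler
-- what changed: Replaces the 3-iteration search loop with the closed-form unique offset (-target) % 8, checked once against MAX_OFFSET and the val>0 / parent-range conditions.
import Mathlib
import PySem

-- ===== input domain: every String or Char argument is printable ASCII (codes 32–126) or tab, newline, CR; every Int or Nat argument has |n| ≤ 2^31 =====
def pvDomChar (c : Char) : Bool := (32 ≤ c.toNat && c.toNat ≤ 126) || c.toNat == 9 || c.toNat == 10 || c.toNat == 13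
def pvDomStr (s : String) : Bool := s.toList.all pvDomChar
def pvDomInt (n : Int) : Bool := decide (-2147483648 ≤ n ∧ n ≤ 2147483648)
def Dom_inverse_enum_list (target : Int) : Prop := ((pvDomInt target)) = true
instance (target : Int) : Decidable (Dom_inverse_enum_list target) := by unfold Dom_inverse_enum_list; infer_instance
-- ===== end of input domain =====

-- B replaces A's 3-iteration search loop with the single closed-form offset (-target) % 8 (simpler).
-- ===== PORT A =====
def pvMAX_OFFSET : Int := 2

-- the 'for offset in range(MAX_OFFSET + 1)' loop, returning on the first hit
def pvLoopA (target : Int) : List Int → Option (Int × Int)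
  | [] => none
  | offset :: rest =>
    let val := target + offset
    if val > 0 ∧ PySem.Int.mod val 8 = 0 then
      let parent := PySem.Int.floordiv val 8
      if 1 ≤ parent ∧ parent ≤ 10 then some (parent, offset)
      else pvLoopA target rest
    else pvLoopA target rest

def inverse_enum_list (target : Int) : Option (Int × Int) :=
  pvLoopA target (PySem.List.pyRange 0 (pvMAX_OFFSET + 1) 1)

-- ===== PORT B =====
def inverse_enum_list_alt (target : Int) : Option (Int × Int) :=
  let offset := PySem.Int.mod (-target) 8
  if offset ≤ pvMAX_OFFSET then
    let val := target + offset
    let parent := PySem.Int.floordiv val 8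
    if val > 0 ∧ 1 ≤ parent ∧ parent ≤ 10 then some (parent, offset)
    else none
  else none

-- ===== PRECONDITION & SPEC =====
def Spec_inverse_enum_list (target : Int) (out : Option (Int × Int)) : Prop := out = inverse_enum_list_alt target
instance (target : Int) (out : Option (Int × Int)) : Decidable (Spec_inverse_enum_list target out) := by unfold Spec_inverse_enum_list; infer_instance

-- ===== CLAIM (what is proved, stated in full; the proofs are below) =====
def Claim_equal_inverse_enum_list : Prop := ∀ (target : Int), Dom_inverse_enum_list target → Spec_inverse_enum_list target (inverse_enum_list target)

-- ===== LEMMAS AND PROOFS =====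

-- ===== VERDICT (by name: the statement is the Claim_ definition above) =====
theorem inverse_enum_list_spec : Claim_equal_inverse_enum_list := by
  intro target _
  unfold Spec_inverse_enum_list inverse_enum_list inverse_enum_list_alt pvMAX_OFFSET
  have hrange : PySem.List.pyRange 0 (2 + 1) 1 = [0, 1, 2] := by decide
  rw [hrange]
  have h8 : (0:Int) < 8 := by decide
  simp only [pvLoopA,
    PySem.Int.mod_eq_emod_of_pos h8, PySem.Int.floordiv_eq_ediv_of_pos h8]
  split_ifs <;>
    first
      | rfl
      | (simp only [Option.some.injEq, Prod.mk.injEq]; omega)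
      | omega
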